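-- pv_equiv track=rewrite | github.com/RakshitChaturvedi/SLPH-MVP-FP | src/scripts/feature_extractor.py | check_session_constancy
-- ===== SOURCE A (Python) =====
-- from typing import List, Any, Dict
--
-- def check_session_constancy(field_values: List[Any], session_ids: List[Any]) -> bool:
--     """ Checks if a field's tru value is const withing a session but varies b/w sessions.
--         Returns True only if both conditions are met.
--     """
--     if len(field_values) < 2 or len(field_values) != len(session_ids):
--         return False
--
--     sessions = {}
--     for session_id, value in zip(session_ids, field_values):
--         sessions.setdefault(session_id, []).append(value)
--
--     # a single session cannot be a session identifier
--     if len(sessions) < 2: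
--         return False
--
--     session_values = []
--     for values_in_session in sessions.values():
--         # condition 1: value must be cosntant withing each session
--         if len(set(values_in_session)) != 1:
--             return False
--         session_values.append(values_in_session[0])
--
--     # condition 2: const value must vary between sessions
--     if len(set(session_values)) > 1:
--         return True
--
--     return False
-- ===== SOURCE B (Python) =====
-- def check_session_constancy(field_values, session_ids):
--     if len(field_values) < 2 or len(field_values) != len(session_ids):
--         return False
--     reps = {}
--     for sid, value in zip(session_ids, field_values):
--         if sid in reps:
--             if reps[sid] != value:
--                 return False
--         else:
--             reps[sid] = value
--     return len(reps) >= 2 and len(set(reps.values())) > 1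
-- ===== Notes on version B (the rewrite author's own statement) =====
-- stated objective: simpler
-- what changed: Single pass keeping one first-seen representative value per session with an early False on any within-session mismatch, instead of grouping all values into per-session lists and scanning them afterwards.
import Mathlib
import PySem

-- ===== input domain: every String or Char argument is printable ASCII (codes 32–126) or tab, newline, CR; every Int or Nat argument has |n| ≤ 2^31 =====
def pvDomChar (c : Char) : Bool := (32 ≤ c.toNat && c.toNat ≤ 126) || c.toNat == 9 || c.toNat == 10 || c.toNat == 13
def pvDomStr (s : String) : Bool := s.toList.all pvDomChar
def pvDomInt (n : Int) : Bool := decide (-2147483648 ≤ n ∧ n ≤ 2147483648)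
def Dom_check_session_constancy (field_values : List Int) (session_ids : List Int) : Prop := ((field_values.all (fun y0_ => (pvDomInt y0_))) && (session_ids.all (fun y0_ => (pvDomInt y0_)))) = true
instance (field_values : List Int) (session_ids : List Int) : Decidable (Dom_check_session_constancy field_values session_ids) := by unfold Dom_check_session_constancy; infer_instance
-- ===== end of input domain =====

-- B replaces A's group-everything-then-scan (dict of per-session value lists, scanned afterwards) by a single
-- pass keeping one first-seen representative per session with an early False on a mismatch (objective: simpler).


-- ===== PORT A =====
-- A's second loop ('for values_in_session in sessions.values(): …') with its early 'return False';
-- 'values_in_session[0]' is '(pyGet? vs 0).getD 0': every group list is nonempty by construction, so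
-- pyGet? is always 'some' there and Python never raises.
def aLoop : List (List Int) → List Int → Option (List Int)
  | [], acc => some acc
  | vs :: rest, acc =>
      if (PySem.Set.ofList vs).length ≠ 1 then none
      else aLoop rest (acc ++ [(PySem.List.pyGet? vs 0).getD 0])

def check_session_constancy (field_values : List Int) (session_ids : List Int) : Bool :=
  if field_values.length < 2 ∨ field_values.length ≠ session_ids.length then false
  else
    -- sessions.setdefault(session_id, []).append(value)  ≡  modify with default [] and append
    let sessions := (session_ids.zip field_values).foldl
        (fun d p => d.modify p.1 [] (fun x => x ++ [p.2])) PySem.Dict.empty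
    if sessions.size < 2 then false
    else
      match aLoop sessions.values [] with
      | none => false
      | some session_values => decide (1 < (PySem.Set.ofList session_values).length)

-- ===== PORT B =====
-- B's single loop: first-seen representative per session id, early 'return False' on a mismatch.
def bLoop : List (Int × Int) → PySem.Dict Int Int → Option (PySem.Dict Int Int)
  | [], reps => some reps
  | (sid, value) :: rest, reps =>
      match reps.get? sid with
      | some r => if r ≠ value then none else bLoop rest reps
      | none => bLoop rest (reps.insert sid value)

def check_session_constancy_alt (field_values : List Int) (session_ids : List Int) : Bool :=
  if field_values.length < 2 ∨ field_values.length ≠ session_ids.length then false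
  else
    match bLoop (session_ids.zip field_values) PySem.Dict.empty with
    | none => false
    | some reps => decide (2 ≤ reps.size ∧ 1 < (PySem.Set.ofList reps.values).length)

-- ===== PRECONDITION & SPEC =====
def Spec_check_session_constancy (field_values : List Int) (session_ids : List Int) (out : Bool) : Prop := out = check_session_constancy_alt field_values session_ids
instance (field_values : List Int) (session_ids : List Int) (out : Bool) : Decidable (Spec_check_session_constancy field_values session_ids out) := by unfold Spec_check_session_constancy; infer_instance

-- ===== CLAIM (what is proved, stated in full; the proofs are below) =====
def Claim_equal_check_session_constancy : Prop := ∀ (field_values : List Int) (session_ids : List Int), Dom_check_session_constancy field_values session_ids → Spec_check_session_constancy field_values session_ids (check_session_constancy field_values session_ids)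

-- ===== LEMMAS AND PROOFS =====

-- B's dict-building step, as a fold step (bLoop performs exactly this when it does not early-return).
def repStep (d : PySem.Dict Int Int) (p : Int × Int) : PySem.Dict Int Int :=
  if d.contains p.1 then d else d.insert p.1 p.2

-- the list of values of session id k, in order (A groups them; B keeps only the head)
def grpv (l : List (Int × Int)) (k : Int) : List Int :=
  (l.filter (fun p => p.1 == k)).map (fun p => p.2)

lemma rep_get (l : List (Int × Int)) (d : PySem.Dict Int Int) (k : Int) :
    (l.foldl repStep d).get? k = (d.get? k).or (grpv l k).head? := by
  induction l generalizing d with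
  | nil => simp [grpv]
  | cons p rest ih =>
    obtain ⟨s, v⟩ := p
    simp only [List.foldl_cons, repStep, grpv, List.filter_cons] at *
    by_cases hk : s = k
    · subst hk
      simp only [beq_self_eq_true, if_true, List.map_cons, List.head?_cons]
      by_cases hc : d.contains s
      · have hsome : (d.get? s).isSome := by
          rw [← PySem.Dict.contains_eq_isSome_get?]; exact hc
        obtain ⟨r, hr⟩ := Option.isSome_iff_exists.mp hsome
        simp [hc, ih, hr]
      · have hnone : d.get? s = none := (PySem.Dict.get?_eq_none_iff_contains d s).mpr (by simpa using hc)
        simp [hc, ih, hnone]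
    · have hbeq : (s == k) = false := by simpa using hk
      simp only [hbeq]
      by_cases hc : d.contains s
      · simp [hc, ih]
      · simp [hc, ih, PySem.Dict.get?_insert, Ne.symm hk]

lemma keys_lock (l : List (Int × Int)) (dA : PySem.Dict Int (List Int)) (dB : PySem.Dict Int Int)
    (h : dA.keys = dB.keys) :
    (l.foldl (fun d p => d.modify p.1 [] (fun x => x ++ [p.2])) dA).keys = (l.foldl repStep dB).keys := by
  induction l generalizing dA dB with
  | nil => exact h
  | cons p rest ih =>
    simp only [List.foldl_cons]
    apply ih
    have hc : dA.contains p.1 = dB.contains p.1 := by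
      rw [PySem.Dict.contains_eq_decide_mem_keys, PySem.Dict.contains_eq_decide_mem_keys, h]
    rw [PySem.Dict.keys_modify, repStep]
    by_cases hb : dB.contains p.1
    · rw [PySem.Dict.keys_insert_of_contains _ _ (hc.trans hb), if_pos hb, h]
    · rw [PySem.Dict.keys_insert_of_not_contains _ _ (hc.trans (by simpa using hb)), if_neg hb,
        PySem.Dict.keys_insert_of_not_contains _ _ (by simpa using hb), h]

lemma bLoop_spec (l : List (Int × Int)) (d : PySem.Dict Int Int) :
    bLoop l d = if l.all (fun p => (l.foldl repStep d).get? p.1 == some p.2)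
                then some (l.foldl repStep d) else none := by
  induction l generalizing d with
  | nil => simp [bLoop]
  | cons p rest ih =>
    obtain ⟨s, v⟩ := p
    have hstep : ∀ d' : PySem.Dict Int Int,
        ((s, v) :: rest).foldl repStep d' = rest.foldl repStep (repStep d' (s, v)) := by
      intro d'; simp
    cases hg : d.get? s with
    | some r =>
      have hc : d.contains s = true := by rw [PySem.Dict.contains_eq_isSome_get?, hg]; rfl
      have hfold : ((s, v) :: rest).foldl repStep d = rest.foldl repStep d := by
        rw [hstep]; simp [repStep, hc]
      have hpres : (rest.foldl repStep d).get? s = some r := by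
        rw [rep_get, hg]; rfl
      by_cases hrv : r = v
      · subst hrv
        have hne : ¬ (r ≠ r) := fun hx => hx rfl
        simp only [bLoop, hg, if_neg hne]
        rw [ih, hfold]
        rw [List.all_cons]
        rw [hpres]
        rw [beq_self_eq_true, Bool.true_and]
      · simp only [bLoop, hg, if_pos hrv]
        rw [hfold]
        rw [List.all_cons]
        rw [hpres]
        have hbv : ((some r : Option Int) == some v) = false := by simpa using hrv
        rw [hbv, Bool.false_and]
        simp
    | none =>
      have hc : d.contains s = false := (PySem.Dict.get?_eq_none_iff_contains d s).mp hg
      have hfold : ((s, v) :: rest).foldl repStep d = rest.foldl repStep (d.insert s v) := by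
        rw [hstep]; simp [repStep, hc]
      have hpres : (rest.foldl repStep (d.insert s v)).get? s = some v := by
        rw [rep_get, PySem.Dict.get?_insert]; simp
      simp only [bLoop, hg]
      rw [ih, hfold]
      rw [List.all_cons]
      rw [hpres]
      rw [beq_self_eq_true, Bool.true_and]

lemma aLoop_spec (vs : List (List Int)) (acc : List Int) :
    aLoop vs acc = if vs.all (fun v => (PySem.Set.ofList v).length == 1)
                   then some (acc ++ vs.map (fun v => (PySem.List.pyGet? v 0).getD 0)) else none := by
  induction vs generalizing acc with
  | nil => simp [aLoop]
  | cons v rest ih =>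
    by_cases h : (PySem.Set.ofList v).length = 1
    · simp [aLoop, h, ih]
    · simp [aLoop, h]

-- all elements of a nonempty list equal its head ↔ set(list) has one element
lemma ofList_len_one (a : Int) (t : List Int) :
    ((PySem.Set.ofList (a :: t)).length = 1) ↔ ∀ x ∈ t, x = a := by
  rw [PySem.Set.ofList_cons]
  simp only [List.length_cons, Nat.add_eq_one_iff]
  constructor
  · rintro h x hx
    have hnil : (PySem.Set.ofList t).discard a = [] := by
      rcases h with ⟨h1, _⟩ | ⟨h1, _⟩
      · exact List.length_eq_zero_iff.mp h1
      · omega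
    by_contra hne
    have : x ∈ (PySem.Set.ofList t).discard a := by
      rw [PySem.Set.mem_discard]
      exact ⟨(PySem.Set.mem_ofList t x).mpr hx, hne⟩
    simp [hnil] at this
  · intro h
    have : (PySem.Set.ofList t).discard a = [] := by
      rw [List.eq_nil_iff_forall_not_mem]
      intro x hx
      rw [PySem.Set.mem_discard, PySem.Set.mem_ofList] at hx
      exact hx.2 (h x hx.1)
    simp [this]

lemma mem_grpv (l : List (Int × Int)) (k : Int) (x : Int) :
    x ∈ grpv l k ↔ ∃ p ∈ l, p.1 = k ∧ p.2 = x := by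
  simp only [grpv, List.mem_map, List.mem_filter, beq_iff_eq]
  constructor
  · rintro ⟨p, ⟨hp, hk⟩, hv⟩; exact ⟨p, hp, hk, hv⟩
  · rintro ⟨p, hp, hk, hv⟩; exact ⟨p, ⟨hp, hk⟩, hv⟩

theorem check_session_constancy_spec : Claim_equal_check_session_constancy := by
  intro field_values session_ids _
  unfold Spec_check_session_constancy check_session_constancy check_session_constancy_alt
  by_cases hguard : field_values.length < 2 ∨ field_values.length ≠ session_ids.length
  · rw [if_pos hguard, if_pos hguard]
  · simp only [if_neg hguard]
    set l := session_ids.zip field_values with hl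
    set g := l.foldl (fun d p => d.modify p.1 [] (fun x => x ++ [p.2])) PySem.Dict.empty with hgdef
    set r := l.foldl repStep PySem.Dict.empty with hrdef
    have hkeys : g.keys = r.keys := by
      rw [hgdef, hrdef]
      exact keys_lock l _ _ (by rw [PySem.Dict.keys_empty, PySem.Dict.keys_empty])
    have hnodup : g.keys.Nodup := by
      rw [hgdef]
      exact PySem.Dict.nodup_keys_foldl_modify_key l (fun p => p.1) []
        (fun _ p => fun x => x ++ [p.2]) PySem.Dict.empty PySem.Dict.nodup_keys_empty
    have hgetD : ∀ k, g.getD k [] = grpv l k := by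
      intro k
      rw [hgdef, PySem.Dict.getD_foldl_modify_append]
      simp [grpv, PySem.Dict.getD_eq_get?_getD, PySem.Dict.get?_empty]
    have hrget : ∀ k, r.get? k = (grpv l k).head? := by
      intro k
      rw [hrdef, rep_get, PySem.Dict.get?_empty, Option.none_or]
    have hkeysmem : ∀ k, k ∈ g.keys ↔ ∃ p ∈ l, p.1 = k := by
      intro k
      rw [hgdef, PySem.Dict.keys_foldl_modify_key l (fun p => p.1) []
        (fun _ p => fun x => x ++ [p.2]) PySem.Dict.empty]
      rw [PySem.Dict.keys_empty, PySem.Set.update_nil_left, PySem.Set.mem_ofList]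
      simp
    -- the two constancy conditions agree
    have hcond : (g.keys.all (fun k => (PySem.Set.ofList (g.getD k [])).length == 1)) =
        (l.all (fun p => r.get? p.1 == some p.2)) := by
      rw [Bool.eq_iff_iff]
      simp only [List.all_eq_true, beq_iff_eq]
      constructor
      · intro h p hp
        have hk : p.1 ∈ g.keys := (hkeysmem p.1).mpr ⟨p, hp, rfl⟩
        have hcst := h p.1 hk
        rw [hgetD] at hcst
        have hmem : p.2 ∈ grpv l p.1 := (mem_grpv l p.1 p.2).mpr ⟨p, hp, rfl, rfl⟩
        rw [hrget]
        cases hgv : grpv l p.1 with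
        | nil => rw [hgv] at hmem; simp at hmem
        | cons a t =>
          rw [hgv] at hcst hmem
          rw [ofList_len_one] at hcst
          rcases List.mem_cons.mp hmem with h1 | h1
          · simp [h1]
          · simp [hcst _ h1]
      · intro h k hk
        rw [hgetD]
        cases hgv : grpv l k with
        | nil =>
          obtain ⟨p, hp, hpk⟩ := (hkeysmem k).mp hk
          have : p.2 ∈ grpv l k := (mem_grpv l k p.2).mpr ⟨p, hp, hpk, rfl⟩
          rw [hgv] at this; simp at this
        | cons a t =>
          rw [ofList_len_one]
          intro x hx
          have hxm : x ∈ grpv l k := by rw [hgv]; exact List.mem_cons_of_mem a hx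
          obtain ⟨p, hp, hpk, hpv⟩ := (mem_grpv l k x).mp hxm
          have := h p hp
          rw [hrget, hpk, hgv] at this
          simp at this
          omega
    -- values of A's session_values list = values of B's reps dict
    have hvals : g.values.map (fun v => (PySem.List.pyGet? v 0).getD 0) = r.values := by
      rw [PySem.Dict.values_eq_map_keys g hnodup [], PySem.Dict.values_eq_map_keys r (hkeys ▸ hnodup) 0,
        ← hkeys, List.map_map]
      apply List.map_congr_left
      intro k hk
      simp only [Function.comp_apply]
      rw [hgetD, PySem.Dict.getD_eq_get?_getD, hrget]
      cases hgv : grpv l k with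
      | nil =>
        obtain ⟨p, hp, hpk⟩ := (hkeysmem k).mp hk
        have : p.2 ∈ grpv l k := (mem_grpv l k p.2).mpr ⟨p, hp, hpk, rfl⟩
        rw [hgv] at this; simp at this
      | cons a t => simp [PySem.List.pyGet?, PySem.List.pyIdx?]
    have hsize : g.size = r.size := by
      have : g.keys.length = r.keys.length := by rw [hkeys]
      simpa [PySem.Dict.keys] using this
    -- evaluate both sides
    have hck : (g.values.all (fun v => (PySem.Set.ofList v).length == 1)) =
        (g.keys.all (fun k => (PySem.Set.ofList (g.getD k [])).length == 1)) := by
      rw [PySem.Dict.values_eq_map_keys g hnodup [], List.all_map]; rfl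
    rw [bLoop_spec, ← hrdef, ← hcond, aLoop_spec, hck]
    by_cases hc : (g.keys.all (fun k => (PySem.Set.ofList (g.getD k [])).length == 1)) = true
    · rw [hc]
      simp
      rw [hvals, hsize, Bool.eq_iff_iff]
      simp only [Bool.and_eq_true, Bool.not_eq_true', decide_eq_true_eq, decide_eq_false_iff_not]
      constructor
      · rintro ⟨h1, h2⟩; exact ⟨by omega, h2⟩
      · rintro ⟨h1, h2⟩; exact ⟨by omega, h2⟩
    · rw [eq_false_of_ne_true hc]
      simp
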